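-- pv_equiv track=rewrite | github.com/adinashby-vanier-college/programming-in-science-lab-5-PhilipBianco | Lab5.py | hollow_square
-- ===== SOURCE A (Python) =====
-- def hollow_square(n):
--     result = ""
--
--     # top line
--     for i in range(1):
--         result += "*" * n
--
--     # middle lines
--     for j in range(n - 2):
--         result += "\n*"
--         for k in range(n - 2):
--             result += " "
--         for l in range(n > 1):
--             result += "*"
--
--     # bottom line
--     for j in range(n > 1):
--         result += "\n" + "*" * n
--
--     return result
-- ===== SOURCE B (Python) =====
-- def hollow_square(n):
--     # Build the square as a uniform n x n grid driven by a border predicate,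
--     # instead of A's segmented top/middle/bottom string concatenation.
--     last = n - 1
--     rows = []
--     for i in range(n):
--         rows.append(''.join(['*' if i == 0 or i == last or j == 0 or j == last else ' ' for j in range(n)]))
--     return '\n'.join(rows)
-- ===== Notes on version B (the rewrite author's own statement) =====
-- stated objective: alternative
-- what changed: Replaces A's three-segment top/middle/bottom string concatenation with a uniform n-by-n grid scan: each cell is '*' iff it lies on the border (i==0 or i==n-1 or j==0 or j==n-1), rows collected and joined with newlines.
import Mathlib
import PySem

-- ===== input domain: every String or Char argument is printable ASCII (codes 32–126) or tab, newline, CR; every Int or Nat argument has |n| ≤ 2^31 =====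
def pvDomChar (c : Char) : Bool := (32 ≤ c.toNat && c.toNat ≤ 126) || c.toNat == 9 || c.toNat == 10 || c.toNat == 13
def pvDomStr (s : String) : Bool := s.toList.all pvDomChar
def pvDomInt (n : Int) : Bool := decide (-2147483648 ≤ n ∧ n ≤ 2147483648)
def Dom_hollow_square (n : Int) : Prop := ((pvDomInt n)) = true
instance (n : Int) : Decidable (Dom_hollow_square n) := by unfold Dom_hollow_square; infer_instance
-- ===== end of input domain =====

-- B builds the square as a uniform n×n grid with a border predicate instead of A's
-- segmented top/middle/bottom concatenation (objective: alternative decomposition).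

-- ===== PORT A =====
-- Ported on List Char ("*" * n = List.replicate n.toNat '*', exact also for n ≤ 0);
-- range(n-2) runs (n-2).toNat times, range(n > 1) runs once iff 1 < n — exact Python semantics.
def hollow_square (n : Int) : String :=
  let result : List Char := []
  -- top line: for i in range(1): result += "*" * n
  let result := (List.range 1).foldl (fun r _ => r ++ List.replicate n.toNat '*') result
  -- middle lines
  let result := (List.range (n - 2).toNat).foldl (fun r _ =>
      let r := r ++ ['\n', '*']
      let r := (List.range (n - 2).toNat).foldl (fun r _ => r ++ [' ']) r
      let r := (List.range (if 1 < n then 1 else 0)).foldl (fun r _ => r ++ ['*']) r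
      r) result
  -- bottom line
  let result := (List.range (if 1 < n then 1 else 0)).foldl (fun r _ =>
      r ++ ('\n' :: List.replicate n.toNat '*')) result
  String.ofList result

-- ===== PORT B =====
-- Transliteration of Source B: grid scan, '*' iff on the border, '\n'.join of the rows.
def hollow_square_alt (n : Int) : String :=
  let last := n - 1
  let rows : List String := (List.range n.toNat).map (fun (i : Nat) =>
    String.ofList ((List.range n.toNat).map (fun (j : Nat) =>
      if i = 0 ∨ (i : Int) = last ∨ j = 0 ∨ (j : Int) = last then '*' else ' ')))
  PySem.Str.join "\n" rows

-- ===== PRECONDITION & SPEC =====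
def Spec_hollow_square (n : Int) (out : String) : Prop := out = hollow_square_alt n
instance (n : Int) (out : String) : Decidable (Spec_hollow_square n out) := by unfold Spec_hollow_square; infer_instance

-- ===== CLAIM (what is proved, stated in full; the proofs are below) =====
def Claim_equal_hollow_square : Prop := ∀ (n : Int), Dom_hollow_square n → Spec_hollow_square n (hollow_square n)

-- ===== LEMMAS AND PROOFS =====

-- A's computation as a function of m = n.toNat
def aChars (m : Nat) : List Char :=
  let result : List Char := []
  let result := (List.range 1).foldl (fun r _ => r ++ List.replicate m '*') result
  let result := (List.range (m - 2)).foldl (fun r _ =>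
      let r := r ++ ['\n', '*']
      let r := (List.range (m - 2)).foldl (fun r _ => r ++ [' ']) r
      let r := (List.range (if 1 < m then 1 else 0)).foldl (fun r _ => r ++ ['*']) r
      r) result
  (List.range (if 1 < m then 1 else 0)).foldl (fun r _ =>
      r ++ ('\n' :: List.replicate m '*')) result

-- B's computation as a function of m = n.toNat
def bRow (m i : Nat) : List Char :=
  (List.range m).map (fun j => if i = 0 ∨ i = m - 1 ∨ j = 0 ∨ j = m - 1 then '*' else ' ')

def bChars (m : Nat) : List Char :=
  PySem.Chars.join ['\n'] ((List.range m).map (bRow m))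

theorem hA (n : Int) : hollow_square n = String.ofList (aChars n.toNat) := by
  have h2 : (n - 2).toNat = n.toNat - 2 := by omega
  have h1 : (1 < n) = (1 < n.toNat) := by apply propext; omega
  simp only [hollow_square, aChars, h2, h1]

theorem hB (n : Int) : hollow_square_alt n = String.ofList (bChars n.toNat) := by
  apply String.toList_inj.mp
  simp only [hollow_square_alt, bChars, PySem.Str.toList_join, List.map_map, String.toList_ofList]
  rw [show ("\n" : String).toList = ['\n'] from rfl]
  congr 1
  apply List.map_congr_left
  intro i hi
  simp only [Function.comp_apply, String.toList_ofList, bRow]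
  apply List.map_congr_left
  intro j hj
  have hi' : i < n.toNat := List.mem_range.mp hi
  have hj' : j < n.toNat := List.mem_range.mp hj
  have ei : ((i : Int) = n - 1) = (i = n.toNat - 1) := by apply propext; omega
  have ej : ((j : Int) = n - 1) = (j = n.toNat - 1) := by apply propext; omega
  simp only [ei, ej]

-- A's middle loop appends one constant segment per iteration
theorem aMid (k c : Nat) (r0 : List Char) :
    (List.range c).foldl (fun r _ =>
      let r := r ++ ['\n', '*']
      let r := (List.range k).foldl (fun r _ => r ++ [' ']) r
      let r := (List.range 1).foldl (fun r _ => r ++ ['*']) r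
      r) r0
    = r0 ++ (List.replicate c ('\n' :: '*' :: (List.replicate k ' ' ++ ['*']))).flatten := by
  have hb : (fun (r : List Char) (_ : Nat) =>
      let r := r ++ ['\n', '*']
      let r := (List.range k).foldl (fun r _ => r ++ [' ']) r
      let r := (List.range 1).foldl (fun r _ => r ++ ['*']) r
      r) = fun r _ => r ++ ('\n' :: '*' :: (List.replicate k ' ' ++ ['*'])) := by
    funext r x
    simp only [PySem.List.foldl_append_singleton_eq_map]
    simp [List.map_const', List.append_assoc]
  rw [hb, PySem.List.foldl_append_eq_flatMap]
  simp [List.flatMap_def, List.map_const']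

theorem bRow_top (m : Nat) : bRow m 0 = List.replicate m '*' := by
  simp [bRow, List.map_const']

theorem bRow_bot (k : Nat) : bRow (k + 2) (k + 1) = List.replicate (k + 2) '*' := by
  simp [bRow, List.map_const']

theorem bRow_mid (k i : Nat) (hi : i < k) :
    bRow (k + 2) (i + 1) = '*' :: (List.replicate k ' ' ++ ['*']) := by
  simp only [bRow]
  apply List.ext_getElem
  · simp
  · intro j h1 h2
    simp only [List.getElem_map, List.getElem_range]
    match j, h2 with
    | 0, _ => simp
    | j + 1, h2 =>
      simp only [List.getElem_cons_succ]
      by_cases hjk : j < k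
      · rw [List.getElem_append_left (by simpa using hjk), List.getElem_replicate, if_neg]
        omega
      · have hj : j = k := by simp at h2; omega
        subst hj
        rw [List.getElem_append_right (by simp), if_pos (by omega)]
        simp

theorem join_shape (a b mid : List Char) : ∀ (k : Nat),
    PySem.Chars.join ['\n'] (a :: (List.replicate k mid ++ [b]))
    = a ++ (List.replicate k ('\n' :: mid)).flatten ++ '\n' :: b := by
  intro k
  induction k generalizing a with
  | zero => simp [PySem.Chars.join_cons_cons, PySem.Chars.join_singleton]
  | succ k ih =>
    rw [List.replicate_succ, List.cons_append, PySem.Chars.join_cons_cons, ih]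
    simp [List.replicate_succ, List.flatten_cons, List.append_assoc]

theorem key (m : Nat) : aChars m = bChars m := by
  match m with
  | 0 => decide
  | 1 => decide
  | k + 2 =>
    have h2 : k + 2 - 2 = k := by omega
    have h1 : (if 1 < k + 2 then 1 else 0) = 1 := by simp
    simp only [aChars, h2, h1]
    rw [show (List.range 1).foldl (fun (r : List Char) _ => r ++ List.replicate (k+2) '*') [] = List.replicate (k+2) '*' by simp]
    rw [aMid k k (List.replicate (k+2) '*')]
    rw [show ∀ r0 : List Char, (List.range 1).foldl (fun r _ => r ++ ('\n' :: List.replicate (k+2) '*')) r0 = r0 ++ '\n' :: List.replicate (k+2) '*' from fun _ => by simp]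
    -- B side
    simp only [bChars]
    rw [List.range_succ_eq_map, List.range_succ]
    simp only [List.map_cons, List.map_append, List.map_map, List.map_nil, Nat.succ_eq_add_one]
    rw [show ((List.range k).map (bRow (k+2) ∘ Nat.succ)) = List.replicate k ('*' :: (List.replicate k ' ' ++ ['*'])) by
          rw [show List.replicate k ('*' :: (List.replicate k ' ' ++ ['*'])) = (List.range k).map (fun _ => '*' :: (List.replicate k ' ' ++ ['*'])) by simp [List.map_const']]
          apply List.map_congr_left
          intro i hi
          simp only [Function.comp_apply, Nat.succ_eq_add_one]
          exact bRow_mid k i (List.mem_range.mp hi)]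
    rw [bRow_bot, bRow_top, join_shape]

-- ===== VERDICT (by name: the statement is the Claim_ definition above) =====
theorem hollow_square_spec : Claim_equal_hollow_square := by
  intro n _
  unfold Spec_hollow_square
  rw [hA, hB, key]
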